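-- pv_equiv track=rewrite | github.com/yeonise/algorithm | programmers/Level3/최고의 집합.py | solution
-- ===== SOURCE A (Python) =====
-- def solution(n, s):
--     if s // n == 0:
--         return [-1]
--
--     piece = s // n
--     rest = s % n
--     answer = [piece] * n
--
--     if rest == 0:
--         return answer
--
--     plus = rest // n
--     last = rest % n
--
--     if plus > 0:
--         answer = [a + plus for a in answer]
--     if last > 0:
--         for i in range(last):
--             answer[n - 1 - i] += 1
--
--     return answer
-- ===== SOURCE B (Python) =====
-- def solution(n, s):
--     if s // n == 0:
--         return [-1]
--     out = []
--     remaining = s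
--     for k in range(n, 0, -1):
--         q = -(remaining // -k)  # ceil(remaining / k): assign the largest element first
--         out.append(q)
--         remaining -= q
--     out.reverse()
--     return out
-- ===== Notes on version B (the rewrite author's own statement) =====
-- stated objective: alternative
-- what changed: Replaces the divmod-based uniform list plus tail-increment loop with a greedy back-to-front construction: repeatedly assign the ceiling of remaining/k to the k-th element, subtract, and reverse at the end; no global quotient/remainder split of the answer list is maintained.
import Mathlib
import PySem

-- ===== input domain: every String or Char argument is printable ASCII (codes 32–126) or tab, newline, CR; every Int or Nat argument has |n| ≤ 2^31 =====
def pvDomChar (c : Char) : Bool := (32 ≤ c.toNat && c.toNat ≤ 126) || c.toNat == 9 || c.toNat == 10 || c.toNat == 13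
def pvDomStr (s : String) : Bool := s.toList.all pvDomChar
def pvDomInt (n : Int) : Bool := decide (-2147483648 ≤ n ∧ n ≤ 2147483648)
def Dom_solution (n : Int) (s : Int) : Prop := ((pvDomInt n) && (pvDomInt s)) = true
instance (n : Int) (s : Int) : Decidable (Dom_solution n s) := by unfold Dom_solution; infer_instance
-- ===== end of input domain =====

-- B builds the answer greedily back-to-front (largest element = ceil(remaining/k), subtract, repeat,
-- then reverse) instead of A's uniform quotient list mutated by a tail-increment loop; same O(n) cost.


-- ===== PORT A =====
def solution (n : Int) (s : Int) : List Int :=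
  if PySem.Int.floordiv s n = 0 then [-1]
  else
    let piece := PySem.Int.floordiv s n
    let rest := PySem.Int.mod s n
    let answer := List.replicate n.toNat piece
    if rest = 0 then answer
    else
      let plus := PySem.Int.floordiv rest n
      let last := PySem.Int.mod rest n
      let answer := if plus > 0 then answer.map (fun a => a + plus) else answer
      let answer :=
        if last > 0 then
          (PySem.List.pyRange 0 last 1).foldl
            (fun acc i =>
              PySem.List.pySetD acc (n - 1 - i) (PySem.List.pyGetD acc (n - 1 - i) 0 + 1))
            answer
        else answer
      answer

-- ===== PORT B =====
-- one loop step of Source B: q = -(remaining // -k); out.append(q); remaining -= q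
def greedyStep (st : List Int × Int) (k : Int) : List Int × Int :=
  let q := -(PySem.Int.floordiv st.2 (-k))
  (st.1 ++ [q], st.2 - q)

def solution_alt (n : Int) (s : Int) : List Int :=
  if PySem.Int.floordiv s n = 0 then [-1]
  else ((PySem.List.pyRange n 0 (-1)).foldl greedyStep ([], s)).1.reverse

-- ===== PRECONDITION & SPEC =====
-- A divides by n, so n = 0 raises ZeroDivisionError in both programs.
def Pre_solution (n : Int) (s : Int) : Prop := n ≠ 0
instance (n : Int) (s : Int) : Decidable (Pre_solution n s) := by unfold Pre_solution; infer_instance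
def pvWitness_solution : Int × Int := (2, 9)

def Spec_solution (n : Int) (s : Int) (out : List Int) : Prop := out = solution_alt n s
instance (n : Int) (s : Int) (out : List Int) : Decidable (Spec_solution n s out) := by unfold Spec_solution; infer_instance

-- ===== CLAIM (what is proved, stated in full; the proofs are below) =====
def Claim_equal_solution : Prop := ∀ (n : Int) (s : Int), Dom_solution n s → Pre_solution n s → Spec_solution n s (solution n s)

-- ===== LEMMAS AND PROOFS =====

-- Setting the last untouched slot of a two-run list turns it into the next two-run list.
lemma set_two_run (piece : Int) (N k : Nat) (hk : k < N) :
    (List.replicate (N - k) piece ++ List.replicate k (piece + 1)).set (N - 1 - k) (piece + 1)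
      = List.replicate (N - (k + 1)) piece ++ List.replicate (k + 1) (piece + 1) := by
  apply List.ext_getElem
  · simp; omega
  · intro j h1 h2
    simp only [List.getElem_set, List.getElem_append, List.length_replicate,
      List.getElem_replicate] at *
    split_ifs <;> omega

-- The element A reads before incrementing is `piece`.
lemma getD_two_run (piece : Int) (N k : Nat) (hk : k < N) :
    (List.replicate (N - k) piece ++ List.replicate k (piece + 1)).getD (N - 1 - k) 0 = piece := by
  rw [List.getD_eq_getElem?_getD, List.getElem?_append_left (by simp; omega)]
  simp only [List.getElem?_replicate]
  rw [if_pos (by omega)]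
  rfl

-- Invariant of A's tail-increment loop: after k steps the list is the two runs.
lemma loop_two_run (piece : Int) (N k : Nat) (hk : k ≤ N) :
    (PySem.List.pyRange 0 (k : Int) 1).foldl
      (fun acc i =>
        PySem.List.pySetD acc ((N : Int) - 1 - i) (PySem.List.pyGetD acc ((N : Int) - 1 - i) 0 + 1))
      (List.replicate N piece)
    = List.replicate (N - k) piece ++ List.replicate k (piece + 1) := by
  induction k with
  | zero => simp [PySem.List.pyRange_one_eq_nil]
  | succ k ih =>
    have hk' : k < N := by omega
    rw [show ((k + 1 : Nat) : Int) = (k : Int) + 1 by push_cast; ring,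
      PySem.List.pyRange_one_succ_right (by positivity), List.foldl_append, ih (by omega)]
    simp only [List.foldl_cons, List.foldl_nil]
    have hidx : (N : Int) - 1 - (k : Int) = ((N - 1 - k : Nat) : Int) := by omega
    rw [hidx, PySem.List.pyGetD_natCast, PySem.List.pySetD_natCast,
      getD_two_run piece N k hk', set_two_run piece N k hk']

-- A (for n > 0, rest ≠ 0) equals the two-run list; proved via the loop invariant above.
lemma solution_two_run (n s : Int) (hpos : 0 < n) (hp : PySem.Int.floordiv s n ≠ 0) :
    solution n s = List.replicate (n - PySem.Int.mod s n).toNat (PySem.Int.floordiv s n)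
      ++ List.replicate (PySem.Int.mod s n).toNat (PySem.Int.floordiv s n + 1) := by
  unfold solution
  set piece := PySem.Int.floordiv s n with hpiece
  set rest := PySem.Int.mod s n with hrest
  have hr0 : 0 ≤ rest := PySem.Int.mod_nonneg (a := s) hpos
  have hrlt : rest < n := PySem.Int.mod_lt (a := s) hpos
  simp only [hp, if_false]
  by_cases hr : rest = 0
  · simp [hr]
  · have hplus : ¬ PySem.Int.floordiv rest n > 0 := by
      have : PySem.Int.floordiv rest n = 0 := by
        rw [PySem.Int.floordiv_eq_iff_of_pos hpos]
        constructor <;> omega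
      omega
    have hlast : PySem.Int.mod rest n = rest := by
      rw [PySem.Int.mod_eq_emod_of_pos hpos]
      exact Int.emod_eq_of_lt hr0 hrlt
    simp only [if_neg hr, if_neg hplus, hlast]
    rw [if_pos (show rest > 0 by omega),
      show rest = ((rest.toNat : Nat) : Int) from by omega,
      show n = ((n.toNat : Nat) : Int) from by omega,
      show ((n.toNat : Nat) : Int) - ((rest.toNat : Nat) : Int)
          = ((n.toNat - rest.toNat : Nat) : Int) from by omega]
    simp only [Int.toNat_natCast]
    exact loop_two_run piece n.toNat rest.toNat (by omega)

-- One greedy step: ceil((m*p+t)/m) is p+1 if 0 < t < m, and p if t = 0.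
lemma ceil_step (m p t : Int) (hm : 0 < m) (h0 : 0 ≤ t) (h1 : t < m) :
    -(PySem.Int.floordiv (m * p + t) (-m)) = if 0 < t then p + 1 else p := by
  have hflip : PySem.Int.floordiv (m * p + t) (-m) = PySem.Int.floordiv (-(m * p + t)) m := by
    rw [← PySem.Int.floordiv_neg_neg]; ring_nf
  rw [hflip]
  split_ifs with ht
  · rw [PySem.Int.neg_floordiv_neg_eq_iff_of_pos]
    constructor <;> nlinarith
    exact hm
  · rw [PySem.Int.neg_floordiv_neg_eq_iff_of_pos]
    constructor <;> nlinarith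
    exact hm

-- Invariant of B's greedy loop: with k slots left and remaining sum k*p + t (0 ≤ t < k, or both 0),
-- the loop appends t copies of p+1 then k-t copies of p, and ends with remaining 0.
lemma greedy_loop (k : Nat) : ∀ (acc : List Int) (p t : Int), 0 ≤ t → (t < (k : Int) ∨ (t = 0 ∧ k = 0)) →
    (PySem.List.pyRange (k : Int) 0 (-1)).foldl greedyStep (acc, (k : Int) * p + t)
      = (acc ++ List.replicate t.toNat (p + 1) ++ List.replicate (k - t.toNat) p, 0) := by
  induction k with
  | zero =>
    intro acc p t h0 h1
    have ht : t = 0 := by omega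
    simp [PySem.List.pyRange_neg_one_eq_nil (by omega : (0:Int) ≤ 0), ht]
  | succ k ih =>
    intro acc p t h0 h1
    have hk1 : (0:Int) < ((k+1 : Nat) : Int) := by positivity
    rw [PySem.List.pyRange_neg_one_cons (by exact_mod_cast hk1)]
    simp only [List.foldl_cons]
    have hstep : greedyStep (acc, ((k+1 : Nat) : Int) * p + t) ((k+1 : Nat) : Int)
        = (acc ++ [if 0 < t then p + 1 else p],
           ((k+1 : Nat) : Int) * p + t - (if 0 < t then p + 1 else p)) := by
      unfold greedyStep
      rw [ceil_step ((k+1 : Nat) : Int) p t hk1 h0 (by omega)]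
    rw [hstep, show ((k+1 : Nat) : Int) - 1 = (k : Int) by push_cast; ring]
    by_cases ht : 0 < t
    · have hrem : ((k+1 : Nat) : Int) * p + t - (if 0 < t then p + 1 else p)
          = (k : Int) * p + (t - 1) := by simp [ht]; ring
      rw [hrem, if_pos ht, ih (acc ++ [p + 1]) p (t - 1) (by omega) (by omega)]
      rw [show t.toNat = (t - 1).toNat + 1 from by omega, List.replicate_succ,
        show k - (t - 1).toNat = k + 1 - t.toNat from by omega]
      simp [List.append_assoc]
      omega
    · have ht0 : t = 0 := by omega
      have hrem : ((k+1 : Nat) : Int) * p + t - (if 0 < t then p + 1 else p)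
          = (k : Int) * p + 0 := by simp [ht0]; ring
      rw [hrem, ih (acc ++ [if 0 < t then p + 1 else p]) p 0 le_rfl (by omega)]
      simp [ht0, List.replicate_succ]

lemma main_eq (n s : Int) (hn : n ≠ 0) : solution n s = solution_alt n s := by
  by_cases hp : PySem.Int.floordiv s n = 0
  · unfold solution solution_alt; simp [hp]
  · rcases lt_or_gt_of_ne hn with hneg | hpos
    · -- n < 0 : both sides are []
      have hA : solution n s = [] := by
        unfold solution
        have hb : n < PySem.Int.mod s n ∧ PySem.Int.mod s n ≤ 0 := PySem.Int.mod_neg_bounds s hneg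
        have hnt : n.toNat = 0 := by omega
        by_cases hr : PySem.Int.mod s n = 0
        · simp [hp, hr, hnt]
        · have hlast : ¬ PySem.Int.mod (PySem.Int.mod s n) n > 0 := by
            have := (PySem.Int.mod_neg_bounds (PySem.Int.mod s n) hneg).2
            omega
          simp only [hp, if_false, hr, hnt, List.replicate_zero, List.map_nil, if_neg hlast]
          split_ifs <;> simp
      have hB : solution_alt n s = [] := by
        unfold solution_alt
        simp [hp, PySem.List.pyRange_neg_one_eq_nil (by omega : n ≤ 0)]
      rw [hA, hB]
    · -- n > 0
      obtain ⟨N, rfl⟩ : ∃ N : Nat, n = (N : Int) := ⟨n.toNat, by omega⟩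
      set piece := PySem.Int.floordiv s (N : Int) with hpiece
      set rest := PySem.Int.mod s (N : Int) with hrest
      have hr0 : 0 ≤ rest := PySem.Int.mod_nonneg (a := s) hpos
      have hrlt : rest < (N : Int) := PySem.Int.mod_lt (a := s) hpos
      have hsum : s = (N : Int) * piece + rest := by
        have := PySem.Int.floordiv_mul_add_mod s (N : Int)
        rw [← hpiece, ← hrest] at this; linarith
      have hB : solution_alt (N : Int) s
          = List.replicate ((N : Int) - rest).toNat piece ++ List.replicate rest.toNat (piece + 1) := by
        unfold solution_alt
        rw [if_neg hp, hsum, greedy_loop N [] piece rest hr0 (by omega)]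
        simp only [List.nil_append]
        rw [List.reverse_append, List.reverse_replicate, List.reverse_replicate]
        rw [show ((N : Int) - rest).toNat = N - rest.toNat from by omega]
      rw [hB, solution_two_run (N : Int) s hpos hp]
-- ===== VERDICT (by name: the statement is the Claim_ definition above) =====
theorem solution_spec : Claim_equal_solution := by
  intro n s _ hpre
  unfold Spec_solution
  exact main_eq n s hpre
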